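-- pv_equiv track=rewrite | github.com/robertofcfm/music-taxonomy | scripts/validate_tree.py | is_title_case_name
-- ===== SOURCE A (Python) =====
-- def is_title_case_name(name: str) -> bool:
-- 	def valid_word(word: str) -> bool:
-- 		if not any(ch.isalpha() for ch in word):
-- 			return True
-- 		first_alpha = next((ch for ch in word if ch.isalpha()), None)
-- 		return bool(first_alpha and first_alpha.isupper())
--
-- 	sanitized = (
-- 		name.replace("(", " ")
-- 		.replace(")", " ")
-- 		.replace("/", " ")
-- 		.replace("&", " ")
-- 		.replace("-", " ")
-- 	)
-- 	words = [w for w in sanitized.split() if w]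
-- 	return all(valid_word(w) for w in words)
-- ===== SOURCE B (Python) =====
-- def is_title_case_name(name: str) -> bool:
--     seen_alpha_this_word = False
--     for ch in name:
--         if ch.isspace() or ch in "()/&-":
--             seen_alpha_this_word = False
--         elif ch.isalpha():
--             if not seen_alpha_this_word:
--                 if not ch.isupper():
--                     return False
--                 seen_alpha_this_word = True
--     return True
-- ===== Notes on version B (the rewrite author's own statement) =====
-- stated objective: simpler
-- what changed: Replaced A's five full replace passes + whitespace split + per-word rescan with a single streaming pass over the characters that keeps one boolean flag recording whether the current word already had its first alphabetic character checked for uppercase.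
import Mathlib
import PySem

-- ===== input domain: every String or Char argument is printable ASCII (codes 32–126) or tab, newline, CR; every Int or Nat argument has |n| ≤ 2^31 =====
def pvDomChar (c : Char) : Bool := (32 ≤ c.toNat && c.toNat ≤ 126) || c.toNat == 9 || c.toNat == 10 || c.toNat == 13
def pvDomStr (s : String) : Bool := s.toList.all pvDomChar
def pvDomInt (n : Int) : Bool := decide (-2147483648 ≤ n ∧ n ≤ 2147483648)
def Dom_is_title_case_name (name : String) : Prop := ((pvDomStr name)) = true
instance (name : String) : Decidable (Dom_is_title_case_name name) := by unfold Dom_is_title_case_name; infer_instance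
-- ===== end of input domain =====

-- B is a single streaming pass over the characters, with one boolean flag per word,
-- instead of A's five replace passes + split + per-word rescan; objective: simpler.

-- ===== PORT A =====
-- inner helper valid_word: no alpha → True, else first alpha must be uppercase
def pvValidWordA (word : String) : Bool :=
  if !(word.toList.any PySem.Chars.isalpha) then true
  else
    -- next((ch for ch in word if ch.isalpha()), None); bool(None and …) = False
    match word.toList.find? PySem.Chars.isalpha with
    | some c => PySem.Chars.isupper c
    | none => false

def is_title_case_name (name : String) : Bool :=
  let sanitized :=
    PySem.Str.replace
      (PySem.Str.replace
        (PySem.Str.replace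
          (PySem.Str.replace
            (PySem.Str.replace name "(" " ")
            ")" " ")
          "/" " ")
        "&" " ")
      "-" " "
  let words := (PySem.Str.split₀ sanitized).filter (fun w => w ≠ "")
  words.all pvValidWordA

-- ===== PORT B =====
-- one pass; the flag records that the current word already had its first alpha checked
def pvAltGo : List Char → Bool → Bool
  | [], _ => true
  | c :: cs, seen =>
    if PySem.Chars.isspace c || "()/&-".toList.contains c then pvAltGo cs false
    else if PySem.Chars.isalpha c then
      if !seen then
        if PySem.Chars.isupper c then pvAltGo cs true else false
      else pvAltGo cs seen
    else pvAltGo cs seen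

def is_title_case_name_alt (name : String) : Bool := pvAltGo name.toList false

-- ===== PRECONDITION & SPEC =====
def Spec_is_title_case_name (name : String) (out : Bool) : Prop := out = is_title_case_name_alt name
instance (name : String) (out : Bool) : Decidable (Spec_is_title_case_name name out) := by unfold Spec_is_title_case_name; infer_instance

-- ===== CLAIM (what is proved, stated in full; the proofs are below) =====
def Claim_equal_is_title_case_name : Prop := ∀ (name : String), Dom_is_title_case_name name → Spec_is_title_case_name name (is_title_case_name name)

-- ===== LEMMAS AND PROOFS =====

-- the combined effect of the five single-character replaces
def pvF (c : Char) : Char := if "()/&-".toList.contains c then ' ' else c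

-- list-level valid_word
def pvValidW (w : List Char) : Bool :=
  match w.find? PySem.Chars.isalpha with
  | some c => PySem.Chars.isupper c
  | none => true

theorem pvReplGo (o : Char) :
    ∀ (l : List Char) (fuel : Nat) (acc : List Char), l.length ≤ fuel →
      PySem.Chars.replace.go [o] [' '] fuel l acc
        = acc.reverse ++ l.map (fun c => if c = o then ' ' else c) := by
  intro l
  induction l with
  | nil =>
    intro fuel acc _
    cases fuel <;> simp [PySem.Chars.replace.go]
  | cons c t ih =>
    intro fuel acc hle
    cases fuel with
    | zero => simp at hle
    | succ fuel =>
      have hlen : t.length ≤ fuel := by simpa using hle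
      by_cases hc : c = o
      · have hpre : [o].isPrefixOf (c :: t) = true := by
          simp [List.isPrefixOf, hc]
        simp only [PySem.Chars.replace.go, hpre, if_true, List.length_cons,
          List.length_nil, List.drop_succ_cons, List.drop_zero, List.reverse_cons,
          List.reverse_nil, List.nil_append, List.singleton_append]
        rw [ih fuel (' ' :: acc) hlen]
        simp [hc]
      · have hpre : ¬ ([o].isPrefixOf (c :: t) = true) := by
          simp [List.isPrefixOf]
          intro h; exact absurd h.symm hc
        simp only [PySem.Chars.replace.go, hpre]
        rw [ih fuel (c :: acc) hlen]
        simp [hc]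

theorem pvReplEq (o : Char) (cs : List Char) :
    PySem.Chars.replace cs [o] [' '] = cs.map (fun c => if c = o then ' ' else c) := by
  simp [PySem.Chars.replace, pvReplGo o cs cs.length [] (le_refl _)]

theorem pvSanitized (name : String) :
    (PySem.Str.replace
      (PySem.Str.replace
        (PySem.Str.replace
          (PySem.Str.replace
            (PySem.Str.replace name "(" " ")
            ")" " ")
          "/" " ")
        "&" " ")
      "-" " ").toList = name.toList.map pvF := by
  simp only [PySem.Str.toList_replace]
  show PySem.Chars.replace (PySem.Chars.replace (PySem.Chars.replace (PySem.Chars.replace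
    (PySem.Chars.replace name.toList ['('] [' ']) [')'] [' ']) ['/'] [' ']) ['&'] [' ']) ['-'] [' ']
    = name.toList.map pvF
  simp only [pvReplEq, List.map_map]
  apply List.map_congr_left
  intro c _
  simp only [Function.comp, pvF]
  by_cases h1 : c = '(' <;> by_cases h2 : c = ')' <;> by_cases h3 : c = '/' <;>
    by_cases h4 : c = '&' <;> by_cases h5 : c = '-' <;> simp_all

-- B's scan does not change when the separators are pre-replaced by spaces
theorem pvAltGoMap : ∀ (cs : List Char) (seen : Bool),
    pvAltGo cs seen = pvAltGo (cs.map pvF) seen := by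
  intro cs
  induction cs with
  | nil => intro seen; rfl
  | cons c t ih =>
    intro seen
    by_cases hsep : "()/&-".toList.contains c = true
    · have hf : pvF c = ' ' := by unfold pvF; exact if_pos hsep
      simp only [List.map_cons, hf, pvAltGo, hsep, Bool.or_true]
      simp [ih, PySem.Chars.isspace]
    · have hf : pvF c = c := by unfold pvF; exact if_neg hsep
      have hsep' : "()/&-".toList.contains c = false := Bool.eq_false_iff.mpr hsep
      simp only [List.map_cons, hf, pvAltGo, hsep', Bool.or_false]
      by_cases hsp : PySem.Chars.isspace c <;>
        by_cases hal : PySem.Chars.isalpha c <;>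
          by_cases hup : PySem.Chars.isupper c <;>
            cases seen <;> simp [hsp, hal, hup, ih]

theorem pvValidWAppend (w : List Char) (c : Char) :
    pvValidW (w ++ [c]) =
      if w.any PySem.Chars.isalpha then pvValidW w
      else if PySem.Chars.isalpha c then PySem.Chars.isupper c else true := by
  by_cases hw : w.any PySem.Chars.isalpha
  · obtain ⟨x, hx⟩ : ∃ x, w.find? PySem.Chars.isalpha = some x := by
      rcases List.any_eq_true.mp hw with ⟨y, hy, hpy⟩
      rcases Option.isSome_iff_exists.mp ((List.find?_isSome).mpr ⟨y, hy, hpy⟩) with ⟨x, hx⟩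
      exact ⟨x, hx⟩
    simp [pvValidW, List.find?_append, hx, hw]
  · have hnone : w.find? PySem.Chars.isalpha = none :=
      List.find?_eq_none.mpr (fun x hx hpx => hw (List.any_eq_true.mpr ⟨x, hx, hpx⟩))
    by_cases hc : PySem.Chars.isalpha c <;>
      simp [pvValidW, List.find?_append, hnone, hw, hc]

theorem pvAnyAppend (w : List Char) (c : Char) :
    (w ++ [c]).any PySem.Chars.isalpha = (w.any PySem.Chars.isalpha || PySem.Chars.isalpha c) := by
  simp

-- the main invariant: split₀'s accumulator state vs. the streaming scan
theorem pvSplitGo : ∀ (cs : List Char), (∀ c ∈ cs, "()/&-".toList.contains c = false) →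
    ∀ (cur : List Char) (acc : List (List Char)),
    (PySem.Chars.split₀.go cs cur acc).all pvValidW
      = (acc.all pvValidW && pvValidW cur.reverse
          && pvAltGo cs (cur.reverse.any PySem.Chars.isalpha)) := by
  intro cs
  induction cs with
  | nil =>
    intro _ cur acc
    by_cases hcur : cur.isEmpty
    · have : cur = [] := by simpa [List.isEmpty_iff] using hcur
      subst this
      simp [PySem.Chars.split₀.go, pvAltGo, pvValidW]
    · rw [show PySem.Chars.split₀.go [] cur acc = (cur.reverse :: acc).reverse from by
        simp [PySem.Chars.split₀.go, hcur]]
      simp only [List.all_reverse, List.all_cons, pvAltGo, Bool.and_true]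
      cases h1 : acc.all pvValidW <;> cases h2 : pvValidW cur.reverse <;> simp
  | cons c rest ih =>
    intro hfree cur acc
    have hc : "()/&-".toList.contains c = false := hfree c (List.mem_cons_self ..)
    have hrest := ih (fun x hx => hfree x (List.mem_cons_of_mem _ hx))
    by_cases hsp : PySem.Chars.isspace c
    · by_cases hcur : cur.isEmpty
      · have : cur = [] := by simpa [List.isEmpty_iff] using hcur
        subst this
        simp [PySem.Chars.split₀.go, hsp, pvAltGo, hrest, pvValidW]
      · simp only [PySem.Chars.split₀.go, hsp, if_pos, hcur, Bool.false_eq_true,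
          not_false_eq_true, if_neg]
        rw [hrest [] (cur.reverse :: acc)]
        simp [pvAltGo, hsp, pvValidW]
        cases pvValidW cur.reverse <;> cases acc.all pvValidW <;> simp
    · simp only [PySem.Chars.split₀.go, hsp, Bool.false_eq_true, not_false_eq_true, if_neg]
      rw [hrest (c :: cur) acc]
      have hsp' : PySem.Chars.isspace c = false := Bool.eq_false_iff.mpr hsp
      simp only [List.reverse_cons, pvValidWAppend, pvAnyAppend, pvAltGo, hsp', hc,
        Bool.or_false]
      by_cases hany : cur.reverse.any PySem.Chars.isalpha
      · by_cases hal : PySem.Chars.isalpha c <;> simp [hal, hany]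
      · have hv : pvValidW cur.reverse = true := by
          have hnone : cur.reverse.find? PySem.Chars.isalpha = none :=
            List.find?_eq_none.mpr
              (fun x hx hpx => hany (List.any_eq_true.mpr ⟨x, hx, hpx⟩))
          simp [pvValidW, hnone]
        by_cases hal : PySem.Chars.isalpha c
        · by_cases hup : PySem.Chars.isupper c <;> simp [hal, hany, hup, hv]
        · simp [hal, hany, hv]

theorem pvValidWordA_eq (w : String) : pvValidWordA w = pvValidW w.toList := by
  unfold pvValidWordA pvValidW
  by_cases h : w.toList.any PySem.Chars.isalpha
  · obtain ⟨x, hx⟩ : ∃ x, w.toList.find? PySem.Chars.isalpha = some x := by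
      rcases List.any_eq_true.mp h with ⟨y, hy, hpy⟩
      exact Option.isSome_iff_exists.mp
        ((List.find?_isSome).mpr ⟨y, hy, hpy⟩)
    simp [h, hx]
  · have hnone : w.toList.find? PySem.Chars.isalpha = none :=
      List.find?_eq_none.mpr (fun x hx hpx => h (List.any_eq_true.mpr ⟨x, hx, hpx⟩))
    simp [h, hnone]

-- the word-list filter, pushed through toList
theorem pvWordsBridge : ∀ (l : List String),
    ((l.filter (fun w => w ≠ "")).all pvValidWordA)
      = (((l.map String.toList).filter (fun w => w ≠ [])).all pvValidW) := by
  intro l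
  induction l with
  | nil => rfl
  | cons w t ih =>
    by_cases hw : w = ""
    · subst hw
      simpa using ih
    · have hw' : w.toList ≠ [] := by
        simpa [String.toList_eq_nil_iff] using hw
      simp only [decide_not] at ih
      simp only [List.filter_cons, List.map_cons, decide_not,
        show decide (w = "") = false by simp [hw],
        show decide (w.toList = []) = false by simp [hw'],
        Bool.not_false, if_true, List.all_cons, ih, pvValidWordA_eq]

theorem pvAllFilterValid (l : List (List Char)) :
    ((l.filter (fun w => w ≠ [])).all pvValidW) = l.all pvValidW := by
  rw [List.all_filter]
  refine List.all_congr rfl (fun w => ?_)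
  by_cases hw : w = [] <;> simp [hw, pvValidW]

theorem pvFreeOfSeps (cs : List Char) :
    ∀ c ∈ cs.map pvF, "()/&-".toList.contains c = false := by
  intro c hc
  rcases List.mem_map.mp hc with ⟨x, _, rfl⟩
  by_cases hx : "()/&-".toList.contains x = true
  · rw [show pvF x = ' ' from by unfold pvF; exact if_pos hx]
    decide
  · rw [show pvF x = x from by unfold pvF; exact if_neg hx]
    exact Bool.eq_false_iff.mpr hx

-- ===== VERDICT (by name: the statement is the Claim_ definition above) =====
theorem is_title_case_name_spec : Claim_equal_is_title_case_name := by
  intro name _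
  unfold Spec_is_title_case_name is_title_case_name is_title_case_name_alt
  rw [pvWordsBridge, PySem.Str.split₀_map_toList, pvSanitized, pvAllFilterValid]
  show (PySem.Chars.split₀.go (name.toList.map pvF) [] []).all pvValidW = _
  rw [pvSplitGo (name.toList.map pvF) (pvFreeOfSeps name.toList) [] [], ← pvAltGoMap]
  simp [pvValidW]
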